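-- pv_equiv track=rewrite | github.com/grihenrik/videotranscribe | whisper_service.py | convert_to_vtt
-- ===== SOURCE A (Python) =====
-- def convert_to_vtt(text, chunk_duration=5):
--     """
--     Convert plain text to WebVTT format.
--
--     Args:
--         text (str): Plain text transcription
--         chunk_duration (int): Duration of each subtitle chunk in seconds
--
--     Returns:
--         str: WebVTT formatted text
--     """
--     # Start with WebVTT header
--     vtt = "WEBVTT\n\n"
--
--     # Split text into chunks (simple implementation)
--     words = text.split()
--     chunks = []
--     current_chunk = []
--
--     for word in words:
--         current_chunk.append(word)
--         if len(current_chunk) >= 10:  # ~10 words per chunk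
--             chunks.append(" ".join(current_chunk))
--             current_chunk = []
--
--     if current_chunk:
--         chunks.append(" ".join(current_chunk))
--
--     # Generate VTT cues
--     for i, chunk in enumerate(chunks):
--         start_time = i * chunk_duration
--         end_time = (i + 1) * chunk_duration
--
--         # Format start and end times (HH:MM:SS.mmm)
--         start_formatted = format_time_vtt(start_time)
--         end_formatted = format_time_vtt(end_time)
--
--         vtt += f"{start_formatted} --> {end_formatted}\n{chunk}\n\n"
--
--     return vtt
--
-- def format_time_vtt(seconds):
--     """Format seconds to WebVTT timestamp (HH:MM:SS.mmm)"""
--     hours = int(seconds / 3600)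
--     minutes = int((seconds % 3600) / 60)
--     seconds = int(seconds % 60)
--     milliseconds = int((seconds - int(seconds)) * 1000)
--     return f"{hours:02d}:{minutes:02d}:{seconds:02d}.{milliseconds:03d}"
-- ===== SOURCE B (Python) =====
-- def convert_to_vtt(text, chunk_duration=5):
--     """Convert plain text to WebVTT format (index-sliced re-implementation)."""
--     words = text.split()
--     cues = []
--     i = 0
--     while i * 10 < len(words):
--         chunk = " ".join(words[i * 10 : i * 10 + 10])
--         cues.append(
--             f"{format_time_vtt(i * chunk_duration)} --> {format_time_vtt((i + 1) * chunk_duration)}\n{chunk}\n\n"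
--         )
--         i += 1
--     return "WEBVTT\n\n" + "".join(cues)
--
-- def format_time_vtt(seconds):
--     """Format seconds to WebVTT timestamp (HH:MM:SS.mmm)"""
--     hours = int(seconds / 3600)
--     minutes = int((seconds % 3600) / 60)
--     seconds = int(seconds % 60)
--     milliseconds = int((seconds - int(seconds)) * 1000)
--     return f"{hours:02d}:{minutes:02d}:{seconds:02d}.{milliseconds:03d}"
-- ===== Notes on version B (the rewrite author's own statement) =====
-- stated objective: simpler
-- what changed: Replaces A's word-by-word accumulator with its 10-count flush and trailing-remainder branch, plus the intermediate chunks list and enumerate pass, by one index-sliced loop that formats each cue directly from words[i*10:i*10+10].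
import Mathlib
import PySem

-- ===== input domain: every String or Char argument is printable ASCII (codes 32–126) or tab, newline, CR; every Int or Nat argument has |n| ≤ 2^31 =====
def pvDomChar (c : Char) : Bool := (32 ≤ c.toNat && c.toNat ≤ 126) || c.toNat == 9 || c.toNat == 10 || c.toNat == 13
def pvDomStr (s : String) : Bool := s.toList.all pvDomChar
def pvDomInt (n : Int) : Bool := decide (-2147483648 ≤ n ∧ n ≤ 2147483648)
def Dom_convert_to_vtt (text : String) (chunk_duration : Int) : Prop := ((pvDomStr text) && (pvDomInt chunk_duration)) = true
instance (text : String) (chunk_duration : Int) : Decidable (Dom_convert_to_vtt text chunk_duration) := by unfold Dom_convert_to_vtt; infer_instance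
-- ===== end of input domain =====

-- B replaces A's word-by-word accumulator (10-count flush + trailing-remainder branch + enumerate pass
-- over an intermediate chunks list) with one index-sliced loop that formats each cue directly; same cost.

-- shared helper: format_time_vtt (both Python files define it identically)
-- int(x/3600) is trunc division = PySem.Int.truncdiv (exact for |x| < 2^53); % is PySem.Int.mod;
-- f"{n:02d}" / f"{n:03d}" = str(n).zfill(2/3) for these values (sign kept in front).
def format_time_vtt (seconds : Int) : String :=
  let hours := PySem.Int.truncdiv seconds 3600
  let minutes := PySem.Int.truncdiv (PySem.Int.mod seconds 3600) 60
  let secs := PySem.Int.mod seconds 60          -- int(seconds % 60): already an int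
  let milliseconds := (secs - secs) * 1000      -- int((seconds - int(seconds)) * 1000) = 0
  PySem.Str.zfill (PySem.Int.toStr hours) 2 ++ ":" ++ PySem.Str.zfill (PySem.Int.toStr minutes) 2
    ++ ":" ++ PySem.Str.zfill (PySem.Int.toStr secs) 2 ++ "." ++ PySem.Str.zfill (PySem.Int.toStr milliseconds) 3

-- ===== PORT A =====
def convert_to_vtt (text : String) (chunk_duration : Int) : String :=
  let words := PySem.Str.split₀ text
  let st := words.foldl (fun (st : List String × List String) word =>
      let cur := st.2 ++ [word]
      if 10 ≤ cur.length then (st.1 ++ [PySem.Str.join " " cur], ([] : List String))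
      else (st.1, cur)) (([] : List String), ([] : List String))
  let chunks := if st.2 ≠ [] then st.1 ++ [PySem.Str.join " " st.2] else st.1
  (PySem.List.enumerate chunks 0).foldl (fun vtt ic =>
      let start_time := ic.1 * chunk_duration
      let end_time := (ic.1 + 1) * chunk_duration
      vtt ++ format_time_vtt start_time ++ " --> " ++ format_time_vtt end_time ++ "\n" ++ ic.2 ++ "\n\n")
    "WEBVTT\n\n"

-- ===== PORT B =====
-- the while loop of Source B, producing the cue list in order; i counts up from 0
def pvLoopB (words : List String) (chunk_duration : Int) (i : Nat) : List String :=
  if _h : 10 * i < words.length then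
    let chunk := PySem.Str.join " " (PySem.List.slice words (some ((i : Int) * 10)) (some ((i : Int) * 10 + 10)))
    (format_time_vtt ((i : Int) * chunk_duration) ++ " --> " ++ format_time_vtt (((i : Int) + 1) * chunk_duration)
      ++ "\n" ++ chunk ++ "\n\n") :: pvLoopB words chunk_duration (i + 1)
  else []
termination_by words.length - 10 * i

def convert_to_vtt_alt (text : String) (chunk_duration : Int) : String :=
  let words := PySem.Str.split₀ text
  "WEBVTT\n\n" ++ PySem.Str.join "" (pvLoopB words chunk_duration 0)

-- ===== PRECONDITION & SPEC =====
def Spec_convert_to_vtt (text : String) (chunk_duration : Int) (out : String) : Prop := out = convert_to_vtt_alt text chunk_duration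
instance (text : String) (chunk_duration : Int) (out : String) : Decidable (Spec_convert_to_vtt text chunk_duration out) := by unfold Spec_convert_to_vtt; infer_instance

-- ===== CLAIM (what is proved, stated in full; the proofs are below) =====
def Claim_equal_convert_to_vtt : Prop := ∀ (text : String) (chunk_duration : Int), Dom_convert_to_vtt text chunk_duration → Spec_convert_to_vtt text chunk_duration (convert_to_vtt text chunk_duration)

-- ===== LEMMAS AND PROOFS =====

-- the chunk list both programs produce: consecutive 10-word groups, last one possibly short
def pvChunks (ws : List String) : List String :=
  if h : ws = [] then [] else PySem.Str.join " " (ws.take 10) :: pvChunks (ws.drop 10)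
termination_by ws.length
decreasing_by
  cases ws with
  | nil => exact absurd rfl h
  | cons a l => simp [List.length_drop]

-- one cue line from a chunk
def pvCueOf (cd : Int) (i : Int) (c : String) : String :=
  format_time_vtt (i * cd) ++ " --> " ++ format_time_vtt ((i + 1) * cd) ++ "\n" ++ c ++ "\n\n"

-- the cue list with indices counting up from i
def pvCuesFrom (cd : Int) (i : Nat) : List String → List String
  | [] => []
  | c :: cs => pvCueOf cd (i : Int) c :: pvCuesFrom cd (i + 1) cs


-- one unfolding step of WF-recursive pvChunks
lemma pvChunks_nil : pvChunks [] = [] := by rw [pvChunks]; rfl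

lemma pvChunks_ne {ws : List String} (h : ws ≠ []) :
    pvChunks ws = PySem.Str.join " " (ws.take 10) :: pvChunks (ws.drop 10) := by
  rw [pvChunks]; simp [h]

-- "".join splits off its head ("" is the separator)
lemma join_empty_cons (c : String) (cs : List String) :
    PySem.Str.join "" (c :: cs) = c ++ PySem.Str.join "" cs := by
  simp only [PySem.Str.join, String.toList_empty, List.map_cons]
  cases cs with
  | nil => simp
  | cons d ds => simp only [List.map_cons, PySem.Chars.join_cons_cons, List.append_nil,
      String.ofList_append, String.ofList_toList]

-- A's accumulator fold, finalized, equals pvChunks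
lemma pvFoldA (ws : List String) : ∀ (cur acc : List String), cur.length < 10 →
    (let st := ws.foldl (fun (st : List String × List String) word =>
        let cur := st.2 ++ [word]
        if 10 ≤ cur.length then (st.1 ++ [PySem.Str.join " " cur], ([] : List String))
        else (st.1, cur)) (acc, cur)
     if st.2 ≠ [] then st.1 ++ [PySem.Str.join " " st.2] else st.1)
      = acc ++ pvChunks (cur ++ ws) := by
  induction ws with
  | nil =>
    intro cur acc h
    simp only [List.foldl_nil, List.append_nil]
    by_cases hc : cur = []
    · simp [hc, pvChunks_nil]
    · rw [pvChunks_ne hc, List.take_of_length_le (by omega),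
        List.drop_eq_nil_of_le (by omega : cur.length ≤ 10), pvChunks_nil]
      simp [hc]
  | cons w ws ih =>
    intro cur acc h
    simp only [List.foldl_cons]
    by_cases h10 : 10 ≤ (cur ++ [w]).length
    · have hl : cur.length = 9 := by simp at h10 ⊢; omega
      simp only [h10, if_pos]
      rw [ih [] (acc ++ [PySem.Str.join " " (cur ++ [w])]) (by simp)]
      have hne : cur ++ w :: ws ≠ [] := by simp
      have htake : (cur ++ w :: ws).take 10 = cur ++ [w] := by
        rw [show cur ++ w :: ws = (cur ++ [w]) ++ ws by simp,
          List.take_append_of_le_length (by simp [hl]),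
          List.take_of_length_le (by simp [hl])]
      have hdrop : (cur ++ w :: ws).drop 10 = ws := by
        rw [show cur ++ w :: ws = (cur ++ [w]) ++ ws by simp,
          List.drop_append_of_le_length (by simp [hl])]
        simp [hl]
      rw [pvChunks_ne hne, htake, hdrop]
      simp
    · simp only [h10, if_neg, not_false_iff]
      rw [ih (cur ++ [w]) acc (by simp at h10 ⊢; omega)]
      simp
-- A's cue-emitting fold over enumerate equals appending the joined pvCuesFrom
lemma pvFoldCue (cd : Int) (chunks : List String) : ∀ (i : Nat) (v : String),
    (PySem.List.enumerate chunks (i : Int)).foldl (fun vtt ic =>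
        vtt ++ format_time_vtt (ic.1 * cd) ++ " --> " ++ format_time_vtt ((ic.1 + 1) * cd)
          ++ "\n" ++ ic.2 ++ "\n\n") v
      = v ++ PySem.Str.join "" (pvCuesFrom cd i chunks) := by
  induction chunks with
  | nil => intro i v; simp [PySem.List.enumerate_nil, pvCuesFrom, PySem.Str.join]
  | cons c cs ih =>
    intro i v
    rw [PySem.List.enumerate_cons, List.foldl_cons,
      show ((i : Int) + 1) = ((i + 1 : Nat) : Int) by push_cast; ring, ih (i + 1)]
    rw [pvCuesFrom]
    simp [join_empty_cons, pvCueOf, String.append_assoc]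

-- B's loop equals pvCuesFrom over pvChunks of the not-yet-consumed suffix
lemma pvLoopB_eq (words : List String) (cd : Int) (i : Nat) :
    pvLoopB words cd i = pvCuesFrom cd i (pvChunks (words.drop (10 * i))) := by
  rw [pvLoopB]
  split
  · rename_i h
    have hne : words.drop (10 * i) ≠ [] := by
      intro hx
      have := congrArg List.length hx
      simp [List.length_drop] at this
      omega
    rw [pvChunks_ne hne, pvCuesFrom, pvLoopB_eq words cd (i + 1)]
    have hsl : PySem.List.slice words (some ((i : Int) * 10)) (some ((i : Int) * 10 + 10))
        = (words.drop (10 * i)).take 10 := by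
      rw [show ((i : Int) * 10) = ((10 * i : Nat) : Int) by push_cast; ring,
        show (((10 * i : Nat) : Int) + 10) = ((10 * i : Nat) : Int) + ((10 : Nat) : Int) by norm_num,
        PySem.List.slice_natCast_add]
    have hdr : words.drop (10 * (i + 1)) = (words.drop (10 * i)).drop 10 := by
      rw [List.drop_drop, Nat.mul_add, Nat.mul_one]
    rw [hsl, hdr]
    rfl
  · rename_i h
    rw [List.drop_eq_nil_of_le (by omega), pvChunks_nil]
    rfl
termination_by words.length - 10 * i
decreasing_by omega

-- ===== VERDICT (by name: the statement is the Claim_ definition above) =====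
theorem convert_to_vtt_spec : Claim_equal_convert_to_vtt := by
  intro text cd _
  show _ = _
  unfold convert_to_vtt convert_to_vtt_alt
  simp only []
  rw [pvLoopB_eq (PySem.Str.split₀ text) cd 0]
  rw [pvFoldA (PySem.Str.split₀ text) [] [] (by simp)]
  rw [show ((0 : Int)) = ((0 : Nat) : Int) by norm_num]
  rw [pvFoldCue cd _ 0]
  simp
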